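-- pv_equiv track=rewrite | github.com/bkvaiude/dataflow-ai | backend/scripts/cleanup_orphaned_schemas.py | find_orphaned_subjects
-- ===== SOURCE A (Python) =====
-- def find_orphaned_subjects(all_subjects: list, active_prefixes: set) -> list:
--     """Find subjects that don't belong to any active pipeline"""
--     orphaned = []
--
--     for subject in all_subjects:
--         # Only check dataflow-related subjects
--         if not subject.startswith("dataflow_"):
--             continue
--
--         # Check if this subject belongs to any active pipeline
--         is_active = False
--         for prefix in active_prefixes:
--             if subject.startswith(prefix):
--                 is_active = True
--                 break
--
--         if not is_active:
--             orphaned.append(subject)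
--
--     return orphaned
-- ===== SOURCE B (Python) =====
-- def find_orphaned_subjects(all_subjects: list, active_prefixes: set) -> list:
--     """Find subjects that don't belong to any active pipeline.
--
--     Alternative strategy: build the prefix set once and walk each subject's
--     own prefixes (up to the longest active prefix), testing set membership,
--     instead of scanning every active prefix per subject.
--     """
--     pset = set(active_prefixes)
--     maxlen = max(map(len, pset), default=-1)
--     orphaned = []
--     for subject in all_subjects:
--         if subject.startswith("dataflow_") and not any(
--             subject[:k] in pset for k in range(min(len(subject), maxlen) + 1)
--         ):
--             orphaned.append(subject)
--     return orphaned
-- ===== Notes on version B (the rewrite author's own statement) =====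
-- stated objective: alternative
-- what changed: Replaces the per-subject scan over all active prefixes with a one-time set of prefixes plus a walk over each subject's own prefixes (bounded by the longest active prefix), testing set membership; trades the O(P) inner prefix scan for O(Lmax) hash lookups per subject.
import Mathlib
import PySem

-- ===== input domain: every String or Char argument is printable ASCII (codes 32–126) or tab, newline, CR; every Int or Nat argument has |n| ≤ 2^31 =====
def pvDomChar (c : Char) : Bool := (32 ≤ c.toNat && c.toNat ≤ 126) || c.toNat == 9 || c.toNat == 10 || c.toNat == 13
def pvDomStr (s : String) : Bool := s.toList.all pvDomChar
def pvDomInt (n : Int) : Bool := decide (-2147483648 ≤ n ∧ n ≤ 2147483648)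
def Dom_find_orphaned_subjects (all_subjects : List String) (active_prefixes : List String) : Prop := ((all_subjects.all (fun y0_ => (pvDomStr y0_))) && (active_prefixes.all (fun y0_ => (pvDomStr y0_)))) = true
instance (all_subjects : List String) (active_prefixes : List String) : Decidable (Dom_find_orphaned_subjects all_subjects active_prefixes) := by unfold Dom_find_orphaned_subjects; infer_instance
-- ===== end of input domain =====

-- ===== PORT A =====
-- B replaces the per-subject scan over all prefixes with a prefix set and a walk
-- over each subject's own prefixes (objective: alternative algorithm, same result).
def find_orphaned_subjects (all_subjects : List String) (active_prefixes : List String) : List String :=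
  all_subjects.foldl (fun orphaned subject =>
    if ¬ (PySem.Str.startswith subject "dataflow_") then orphaned
    else
      -- inner loop with break over active_prefixes: is_active = any prefix matches
      let is_active := active_prefixes.any (fun p => PySem.Str.startswith subject p)
      if ¬ is_active then orphaned ++ [subject] else orphaned) []

-- ===== PORT B =====
def find_orphaned_subjects_alt (all_subjects : List String) (active_prefixes : List String) : List String :=
  let pset := PySem.Set.ofList active_prefixes
  let maxlen := PySem.List.maxD (pset.map PySem.Str.len) (fun x => x) (-1)
  all_subjects.foldl (fun orphaned subject =>
    if PySem.Str.startswith subject "dataflow_" &&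
       !((PySem.List.pyRange 0 (min (PySem.Str.len subject) maxlen + 1)).any
           (fun k => pset.contains (PySem.Str.slice subject none (some k))))
    then orphaned ++ [subject] else orphaned) []

-- ===== PRECONDITION & SPEC =====
def Spec_find_orphaned_subjects (all_subjects : List String) (active_prefixes : List String) (out : List String) : Prop := out = find_orphaned_subjects_alt all_subjects active_prefixes
instance (all_subjects : List String) (active_prefixes : List String) (out : List String) : Decidable (Spec_find_orphaned_subjects all_subjects active_prefixes out) := by unfold Spec_find_orphaned_subjects; infer_instance

-- ===== CLAIM (what is proved, stated in full; the proofs are below) =====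
def Claim_equal_find_orphaned_subjects : Prop := ∀ (all_subjects : List String) (active_prefixes : List String), Dom_find_orphaned_subjects all_subjects active_prefixes → Spec_find_orphaned_subjects all_subjects active_prefixes (find_orphaned_subjects all_subjects active_prefixes)

-- ===== LEMMAS AND PROOFS =====

-- A's inner prefix scan and B's prefix walk decide the same thing for one subject.
lemma inner_scan_eq_walk (s : String) (ps : List String) :
    ps.any (fun p => PySem.Str.startswith s p)
    = ((PySem.List.pyRange 0
          (min (PySem.Str.len s)
               (PySem.List.maxD ((PySem.Set.ofList ps).map PySem.Str.len) (fun x => x) (-1)) + 1)).any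
        (fun k => (PySem.Set.ofList ps).contains (PySem.Str.slice s none (some k)))) := by
  apply Bool.eq_iff_iff.mpr
  simp only [List.any_eq_true]
  constructor
  · rintro ⟨p, hp, hsw⟩
    have hpre : p.toList <+: s.toList := by
      rw [PySem.Str.startswith_eq] at hsw
      exact (PySem.Chars.startswith_iff s.toList p.toList).mp hsw
    refine ⟨(p.toList.length : Int), ?_, ?_⟩
    · rw [PySem.List.mem_pyRange_one]
      have hmem : PySem.Str.len p ∈ (PySem.Set.ofList ps).map PySem.Str.len :=
        List.mem_map_of_mem ((PySem.Set.mem_ofList ps p).mpr hp)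
      have hmax := PySem.List.le_maxD_id _ (-1) _ hmem
      have hlen := hpre.length_le
      simp only [PySem.Str.len_eq] at hmax ⊢
      omega
    · have hslice : PySem.Str.slice s none (some (p.toList.length : Int)) = p := by
        apply String.toList_inj.mp
        simp only [PySem.Str.toList_slice, PySem.Chars.slice_eq_listSlice,
          PySem.List.slice_to_natCast]
        exact (List.prefix_iff_eq_take.mp hpre).symm
      rw [hslice]
      simp [PySem.Set.mem_ofList, hp]
  · rintro ⟨k, hk, hc⟩
    have h0 : (0:Int) ≤ k := (PySem.List.mem_pyRange_one.mp hk).1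
    have hw : PySem.Str.slice s none (some k) ∈ ps := by
      simpa [PySem.Set.mem_ofList] using hc
    refine ⟨PySem.Str.slice s none (some k), hw, ?_⟩
    rw [PySem.Str.startswith_eq]
    rw [PySem.Chars.startswith_iff]
    have : (PySem.Str.slice s none (some k)).toList = s.toList.take k.toNat := by
      simp [PySem.Str.toList_slice, PySem.List.slice_to s.toList h0]
    rw [this]
    exact List.take_prefix _ _

lemma step_eq (ps : List String) :
    (fun (orphaned : List String) (subject : String) =>
      if ¬ (PySem.Str.startswith subject "dataflow_") then orphaned
      else
        let is_active := ps.any (fun p => PySem.Str.startswith subject p)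
        if ¬ is_active then orphaned ++ [subject] else orphaned)
    = (fun (orphaned : List String) (subject : String) =>
      if PySem.Str.startswith subject "dataflow_" &&
         !((PySem.List.pyRange 0
              (min (PySem.Str.len subject)
                   (PySem.List.maxD ((PySem.Set.ofList ps).map PySem.Str.len) (fun x => x) (-1)) + 1)).any
             (fun k => (PySem.Set.ofList ps).contains (PySem.Str.slice subject none (some k))))
      then orphaned ++ [subject] else orphaned) := by
  funext orphaned subject
  rw [show (ps.any (fun p => PySem.Str.startswith subject p))
        = ((PySem.List.pyRange 0
              (min (PySem.Str.len subject)
                   (PySem.List.maxD ((PySem.Set.ofList ps).map PySem.Str.len) (fun x => x) (-1)) + 1)).any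
             (fun k => (PySem.Set.ofList ps).contains (PySem.Str.slice subject none (some k))))
      from inner_scan_eq_walk subject ps]
  cases PySem.Str.startswith subject "dataflow_" <;>
    cases ((PySem.List.pyRange 0
              (min (PySem.Str.len subject)
                   (PySem.List.maxD ((PySem.Set.ofList ps).map PySem.Str.len) (fun x => x) (-1)) + 1)).any
             (fun k => (PySem.Set.ofList ps).contains (PySem.Str.slice subject none (some k)))) <;>
    simp

-- ===== VERDICT (by name: the statement is the Claim_ definition above) =====
theorem find_orphaned_subjects_spec : Claim_equal_find_orphaned_subjects := by
  intro all_subjects active_prefixes _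
  unfold Spec_find_orphaned_subjects find_orphaned_subjects find_orphaned_subjects_alt
  rw [step_eq active_prefixes]
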